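-- pv_equiv track=rewrite | github.com/uha9218/programmers | 프로그래머스/0/120956. 옹알이 （1）/옹알이 （1）.py | solution
-- ===== SOURCE A (Python) =====
-- def solution(babbling):
--     answer = 0
--     can_speak = ["aya", "ye", "woo", "ma"]
--
--     for word in babbling:
--         while True:
--             is_matched = False
--             for babble in can_speak:
--                 if word.startswith(babble):
--                     word = word[len(babble):]
--                     is_matched = True
--                     break
--
--             if not is_matched:
--                 break
--         if len(word) == 0:
--             answer += 1
--     return answer
-- ===== SOURCE B (Python) =====
-- def formable(w):
--     # True iff w is a concatenation of the four syllables, matched from the end.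
--     if w == "":
--         return True
--     for s in ("aya", "ye", "woo", "ma"):
--         if w.endswith(s) and formable(w[:-len(s)]):
--             return True
--     return False
--
--
-- def solution(babbling):
--     return sum(formable(w) for w in babbling)
-- ===== Notes on version B (the rewrite author's own statement) =====
-- stated objective: alternative
-- what changed: A iteratively strips the first matching syllable from the front of each word in a while-loop; B instead decides each word by a recursive function that matches syllables from the end (trying all four suffixes), counting valid words with sum().
import Mathlib
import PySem

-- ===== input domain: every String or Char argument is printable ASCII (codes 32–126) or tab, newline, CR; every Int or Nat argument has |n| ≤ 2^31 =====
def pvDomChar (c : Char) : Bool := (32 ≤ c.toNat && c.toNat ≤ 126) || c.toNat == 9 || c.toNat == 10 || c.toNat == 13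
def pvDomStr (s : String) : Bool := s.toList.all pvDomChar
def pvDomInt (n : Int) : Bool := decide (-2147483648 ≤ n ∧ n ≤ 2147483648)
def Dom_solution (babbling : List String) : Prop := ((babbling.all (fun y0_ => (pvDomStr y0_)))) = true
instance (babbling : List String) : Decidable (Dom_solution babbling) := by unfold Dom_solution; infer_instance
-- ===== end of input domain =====

-- B checks each word by recursive suffix matching (right-to-left, trying all four syllables)
-- instead of A's iterative first-match prefix-stripping loop; alternative decomposition, similar cost.

-- ===== PORT A =====
-- can_speak = ["aya", "ye", "woo", "ma"]
def canSpeak : List (List Char) := [['a','y','a'], ['y','e'], ['w','o','o'], ['m','a']]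

-- the inner `for babble in can_speak: if word.startswith(babble): word = word[len(babble):]; break`
-- (some = a syllable matched and was stripped, none = is_matched stayed False)
def tryBabble : List (List Char) → List Char → Option (List Char)
  | [], _ => none
  | b :: rest, w =>
      if PySem.Chars.startswith w b then some (PySem.List.slice w (some (b.length : Int)) none)
      else tryBabble rest w

-- termination helper for the `while True` loop: a successful match strips one nonempty syllable
theorem tryBabble_shape (w w' : List Char) (h : tryBabble canSpeak w = some w') :
    w = 'a'::'y'::'a'::w' ∨ w = 'y'::'e'::w' ∨ w = 'w'::'o'::'o'::w' ∨ w = 'm'::'a'::w' := by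
  simp only [tryBabble, canSpeak] at h
  split_ifs at h with h1 h2 h3 h4
  · obtain ⟨r, hr⟩ := (PySem.Chars.startswith_iff _ _).mp h1
    subst hr
    simp [PySem.List.slice, PySem.List.clampIdx] at h
    subst h; simp
  · obtain ⟨r, hr⟩ := (PySem.Chars.startswith_iff _ _).mp h2
    subst hr
    simp [PySem.List.slice, PySem.List.clampIdx] at h
    subst h; simp
  · obtain ⟨r, hr⟩ := (PySem.Chars.startswith_iff _ _).mp h3
    subst hr
    simp [PySem.List.slice, PySem.List.clampIdx] at h
    subst h; simp
  · obtain ⟨r, hr⟩ := (PySem.Chars.startswith_iff _ _).mp h4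
    subst hr
    simp [PySem.List.slice, PySem.List.clampIdx] at h
    subst h; simp

theorem tryBabble_length (w w' : List Char) (h : tryBabble canSpeak w = some w') :
    w'.length < w.length := by
  rcases tryBabble_shape w w' h with h | h | h | h <;> subst h <;> simp <;> omega

-- the `while True:` loop of A, returning the final value of `word`
def stripLoop (w : List Char) : List Char :=
  match h : tryBabble canSpeak w with
  | some w' => stripLoop w'
  | none => w
termination_by w.length
decreasing_by exact tryBabble_length _ _ h

def solution (babbling : List String) : Int :=
  babbling.foldl
    (fun answer word => if (stripLoop word.toList).length = 0 then answer + 1 else answer) 0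

-- ===== PORT B =====
-- w[:-k] is ported as w.take (w.length - k): exact, since Python clamps w[:-k] to "" when
-- len(w) ≤ k exactly as Nat subtraction does.
def formable (w : List Char) : Bool :=
  if w = [] then true
  else
    (PySem.Chars.endswith w ['a','y','a'] && formable (w.take (w.length - 3)))
    || (PySem.Chars.endswith w ['y','e'] && formable (w.take (w.length - 2)))
    || (PySem.Chars.endswith w ['w','o','o'] && formable (w.take (w.length - 3)))
    || (PySem.Chars.endswith w ['m','a'] && formable (w.take (w.length - 2)))
termination_by w.length
decreasing_by
  all_goals
    have hw : 0 < w.length := List.length_pos_of_ne_nil (by assumption)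
    simp [List.length_take]; omega

-- sum(formable(w) for w in babbling): booleans summed as 0/1
def solution_alt (babbling : List String) : Int :=
  babbling.foldl (fun acc w => acc + (if formable w.toList then 1 else 0)) 0

-- ===== PRECONDITION & SPEC =====
def Spec_solution (babbling : List String) (out : Int) : Prop := out = solution_alt babbling
instance (babbling : List String) (out : Int) : Decidable (Spec_solution babbling out) := by unfold Spec_solution; infer_instance

-- ===== CLAIM (what is proved, stated in full; the proofs are below) =====
def Claim_equal_solution : Prop := ∀ (babbling : List String), Dom_solution babbling → Spec_solution babbling (solution babbling)

-- ===== LEMMAS AND PROOFS =====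

-- w is a concatenation of the four syllables
inductive Dec : List Char → Prop
  | nil : Dec []
  | aya (r : List Char) : Dec r → Dec ('a'::'y'::'a'::r)
  | ye  (r : List Char) : Dec r → Dec ('y'::'e'::r)
  | woo (r : List Char) : Dec r → Dec ('w'::'o'::'o'::r)
  | ma  (r : List Char) : Dec r → Dec ('m'::'a'::r)

theorem sw_true {w p : List Char} (h : p <+: w) : PySem.Chars.startswith w p = true :=
  (PySem.Chars.startswith_iff _ _).mpr h

theorem sw_false {w p : List Char} (h : ¬ p <+: w) : PySem.Chars.startswith w p = false := by
  rw [← Bool.not_eq_true, PySem.Chars.startswith_iff]; exact h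

theorem ew_true {w s : List Char} (h : s <:+ w) : PySem.Chars.endswith w s = true :=
  (PySem.Chars.endswith_iff _ _).mpr h

theorem dec_append {p q : List Char} (hp : Dec p) (hq : Dec q) : Dec (p ++ q) := by
  induction hp with
  | nil => simpa
  | aya r _ ih => exact Dec.aya _ ih
  | ye r _ ih => exact Dec.ye _ ih
  | woo r _ ih => exact Dec.woo _ ih
  | ma r _ ih => exact Dec.ma _ ih

theorem dec_last {w : List Char} (h : Dec w) :
    w = [] ∨ ∃ p, Dec p ∧ (w = p ++ ['a','y','a'] ∨ w = p ++ ['y','e'] ∨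
      w = p ++ ['w','o','o'] ∨ w = p ++ ['m','a']) := by
  induction h with
  | nil => exact Or.inl rfl
  | aya r _ ih =>
      right
      rcases ih with rfl | ⟨p, hp, hc⟩
      · exact ⟨[], Dec.nil, Or.inl rfl⟩
      · refine ⟨'a'::'y'::'a'::p, Dec.aya _ hp, ?_⟩
        rcases hc with rfl | rfl | rfl | rfl <;> simp
  | ye r _ ih =>
      right
      rcases ih with rfl | ⟨p, hp, hc⟩
      · exact ⟨[], Dec.nil, Or.inr (Or.inl rfl)⟩
      · refine ⟨'y'::'e'::p, Dec.ye _ hp, ?_⟩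
        rcases hc with rfl | rfl | rfl | rfl <;> simp
  | woo r _ ih =>
      right
      rcases ih with rfl | ⟨p, hp, hc⟩
      · exact ⟨[], Dec.nil, Or.inr (Or.inr (Or.inl rfl))⟩
      · refine ⟨'w'::'o'::'o'::p, Dec.woo _ hp, ?_⟩
        rcases hc with rfl | rfl | rfl | rfl <;> simp
  | ma r _ ih =>
      right
      rcases ih with rfl | ⟨p, hp, hc⟩
      · exact ⟨[], Dec.nil, Or.inr (Or.inr (Or.inr rfl))⟩
      · refine ⟨'m'::'a'::p, Dec.ma _ hp, ?_⟩
        rcases hc with rfl | rfl | rfl | rfl <;> simp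

-- ---- A-side characterisation: stripLoop w = [] ↔ Dec w ----

theorem tryBabble_nil : tryBabble canSpeak [] = none := by
  have h : ∀ p : List Char, p ≠ [] → PySem.Chars.startswith [] p = false := by
    intro p hp
    exact sw_false (fun ⟨t, ht⟩ => hp (by cases p <;> simp_all))
  simp [tryBabble, canSpeak, h]

theorem tryBabble_aya (r : List Char) : tryBabble canSpeak ('a'::'y'::'a'::r) = some r := by
  have h1 : PySem.Chars.startswith ('a'::'y'::'a'::r) ['a','y','a'] = true := sw_true ⟨r, rfl⟩
  simp [tryBabble, canSpeak, h1, PySem.List.slice, PySem.List.clampIdx]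

theorem tryBabble_ye (r : List Char) : tryBabble canSpeak ('y'::'e'::r) = some r := by
  have h1 : PySem.Chars.startswith ('y'::'e'::r) ['a','y','a'] = false := sw_false (by simp)
  have h2 : PySem.Chars.startswith ('y'::'e'::r) ['y','e'] = true := sw_true ⟨r, rfl⟩
  simp [tryBabble, canSpeak, h1, h2, PySem.List.slice, PySem.List.clampIdx]

theorem tryBabble_woo (r : List Char) : tryBabble canSpeak ('w'::'o'::'o'::r) = some r := by
  have h1 : PySem.Chars.startswith ('w'::'o'::'o'::r) ['a','y','a'] = false := sw_false (by simp)
  have h2 : PySem.Chars.startswith ('w'::'o'::'o'::r) ['y','e'] = false := sw_false (by simp)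
  have h3 : PySem.Chars.startswith ('w'::'o'::'o'::r) ['w','o','o'] = true := sw_true ⟨r, rfl⟩
  simp [tryBabble, canSpeak, h1, h2, h3, PySem.List.slice, PySem.List.clampIdx]

theorem tryBabble_ma (r : List Char) : tryBabble canSpeak ('m'::'a'::r) = some r := by
  have h1 : PySem.Chars.startswith ('m'::'a'::r) ['a','y','a'] = false := sw_false (by simp)
  have h2 : PySem.Chars.startswith ('m'::'a'::r) ['y','e'] = false := sw_false (by simp)
  have h3 : PySem.Chars.startswith ('m'::'a'::r) ['w','o','o'] = false := sw_false (by simp)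
  have h4 : PySem.Chars.startswith ('m'::'a'::r) ['m','a'] = true := sw_true ⟨r, rfl⟩
  simp [tryBabble, canSpeak, h1, h2, h3, h4, PySem.List.slice, PySem.List.clampIdx]

theorem stripLoop_of_dec {w : List Char} (h : Dec w) : stripLoop w = [] := by
  induction h with
  | nil =>
      rw [stripLoop]; split
      · rename_i w' hw'; rw [tryBabble_nil] at hw'; cases hw'
      · rfl
  | aya r _ ih =>
      rw [stripLoop]; split
      · rename_i w' hw'; rw [tryBabble_aya] at hw'; injection hw' with hw'; subst hw'; exact ih
      · rename_i hw'; rw [tryBabble_aya] at hw'; cases hw'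
  | ye r _ ih =>
      rw [stripLoop]; split
      · rename_i w' hw'; rw [tryBabble_ye] at hw'; injection hw' with hw'; subst hw'; exact ih
      · rename_i hw'; rw [tryBabble_ye] at hw'; cases hw'
  | woo r _ ih =>
      rw [stripLoop]; split
      · rename_i w' hw'; rw [tryBabble_woo] at hw'; injection hw' with hw'; subst hw'; exact ih
      · rename_i hw'; rw [tryBabble_woo] at hw'; cases hw'
  | ma r _ ih =>
      rw [stripLoop]; split
      · rename_i w' hw'; rw [tryBabble_ma] at hw'; injection hw' with hw'; subst hw'; exact ih
      · rename_i hw'; rw [tryBabble_ma] at hw'; cases hw'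

theorem dec_of_stripLoop : ∀ n (w : List Char), w.length ≤ n → stripLoop w = [] → Dec w := by
  intro n
  induction n with
  | zero =>
      intro w hl _
      have : w = [] := List.eq_nil_of_length_eq_zero (Nat.le_zero.mp hl)
      subst this; exact Dec.nil
  | succ n ih =>
      intro w hl hs
      rw [stripLoop] at hs
      split at hs
      · rename_i w' hw'
        have hlen := tryBabble_length w w' hw'
        have hd : Dec w' := ih w' (by omega) hs
        rcases tryBabble_shape w w' hw' with rfl | rfl | rfl | rfl
        · exact Dec.aya _ hd
        · exact Dec.ye _ hd
        · exact Dec.woo _ hd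
        · exact Dec.ma _ hd
      · subst hs; exact Dec.nil

-- ---- B-side characterisation: formable w = true ↔ Dec w ----

theorem formable_of_dec : ∀ n (w : List Char), w.length ≤ n → Dec w → formable w = true := by
  intro n
  induction n with
  | zero =>
      intro w hl _
      have : w = [] := List.eq_nil_of_length_eq_zero (Nat.le_zero.mp hl)
      subst this; rw [formable]; simp
  | succ n ih =>
      intro w hl hd
      rcases dec_last hd with rfl | ⟨p, hp, hc⟩
      · rw [formable]; simp
      · rcases hc with rfl | rfl | rfl | rfl
        · have hf : formable p = true := ih p (by simp at hl ⊢; omega) hp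
          have he : PySem.Chars.endswith (p ++ ['a','y','a']) ['a','y','a'] = true :=
            ew_true ⟨p, rfl⟩
          rw [formable]; simp [he, hf]
        · have hf : formable p = true := ih p (by simp at hl ⊢; omega) hp
          have he : PySem.Chars.endswith (p ++ ['y','e']) ['y','e'] = true :=
            ew_true ⟨p, rfl⟩
          rw [formable]; simp [he, hf]
        · have hf : formable p = true := ih p (by simp at hl ⊢; omega) hp
          have he : PySem.Chars.endswith (p ++ ['w','o','o']) ['w','o','o'] = true :=
            ew_true ⟨p, rfl⟩
          rw [formable]; simp [he, hf]
        · have hf : formable p = true := ih p (by simp at hl ⊢; omega) hp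
          have he : PySem.Chars.endswith (p ++ ['m','a']) ['m','a'] = true :=
            ew_true ⟨p, rfl⟩
          rw [formable]; simp [he, hf]

theorem dec_of_formable : ∀ n (w : List Char), w.length ≤ n → formable w = true → Dec w := by
  intro n
  induction n with
  | zero =>
      intro w hl _
      have : w = [] := List.eq_nil_of_length_eq_zero (Nat.le_zero.mp hl)
      subst this; exact Dec.nil
  | succ n ih =>
      intro w hl hf
      by_cases hw : w = []
      · subst hw; exact Dec.nil
      · rw [formable] at hf
        simp only [hw, if_false, Bool.or_eq_true, Bool.and_eq_true] at hf
        rcases hf with ((⟨h1, h2⟩ | ⟨h1, h2⟩) | ⟨h1, h2⟩) | ⟨h1, h2⟩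
        · obtain ⟨p, hp⟩ := (PySem.Chars.endswith_iff _ _).mp h1
          subst hp
          rw [show (p ++ ['a','y','a']).take ((p ++ ['a','y','a']).length - 3) = p by simp] at h2
          exact dec_append (ih p (by simp at hl ⊢; omega) h2) (Dec.aya [] Dec.nil)
        · obtain ⟨p, hp⟩ := (PySem.Chars.endswith_iff _ _).mp h1
          subst hp
          rw [show (p ++ ['y','e']).take ((p ++ ['y','e']).length - 2) = p by simp] at h2
          exact dec_append (ih p (by simp at hl ⊢; omega) h2) (Dec.ye [] Dec.nil)
        · obtain ⟨p, hp⟩ := (PySem.Chars.endswith_iff _ _).mp h1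
          subst hp
          rw [show (p ++ ['w','o','o']).take ((p ++ ['w','o','o']).length - 3) = p by simp] at h2
          exact dec_append (ih p (by simp at hl ⊢; omega) h2) (Dec.woo [] Dec.nil)
        · obtain ⟨p, hp⟩ := (PySem.Chars.endswith_iff _ _).mp h1
          subst hp
          rw [show (p ++ ['m','a']).take ((p ++ ['m','a']).length - 2) = p by simp] at h2
          exact dec_append (ih p (by simp at hl ⊢; omega) h2) (Dec.ma [] Dec.nil)

-- ---- putting it together ----

theorem per_word (w : List Char) : ((stripLoop w).length = 0) ↔ (formable w = true) := by
  constructor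
  · intro h
    exact formable_of_dec w.length w le_rfl
      (dec_of_stripLoop w.length w le_rfl (List.eq_nil_of_length_eq_zero h))
  · intro h
    rw [stripLoop_of_dec (dec_of_formable w.length w le_rfl h)]
    rfl

-- ===== VERDICT (by name: the statement is the Claim_ definition above) =====
theorem solution_spec : Claim_equal_solution := by
  intro babbling _
  unfold Spec_solution solution solution_alt
  have hfun : (fun (answer : Int) (word : String) =>
      if (stripLoop word.toList).length = 0 then answer + 1 else answer)
      = (fun (acc : Int) (w : String) => acc + (if formable w.toList then 1 else 0)) := by
    funext acc w
    by_cases h : formable w.toList = true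
    · simp [h, (per_word w.toList).mpr h]
    · have h0 : ¬ (stripLoop w.toList).length = 0 := fun hc => h ((per_word w.toList).mp hc)
      simp [h, h0]
  rw [hfun]
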